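-- pv_equiv track=rewrite | github.com/KISHORERAJA28/Algorithm-Exercise | Smart String Reducer.py | reduced_string
-- ===== SOURCE A (Python) =====
-- def reduced_string(s:str):
--     stack=[]
--     for char in s:
--         if stack and stack[-1].lower()==char.lower():
--             stack.pop()
--         else:
--             stack.append(char)
--     return "" .join(stack)
-- ===== SOURCE B (Python) =====
-- def reduced_string(s: str):
--     # Repeatedly delete the first adjacent case-insensitively equal pair
--     # until a full scan finds none (fixpoint).
--     while True:
--         for i in range(len(s) - 1):
--             if s[i].lower() == s[i + 1].lower():
--                 s = s[:i] + s[i + 2:]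
--                 break
--         else:
--             return s
-- ===== Notes on version B (the rewrite author's own statement) =====
-- stated objective: alternative
-- what changed: Replaces the single left-to-right stack pass with an iterate-to-fixpoint strategy that repeatedly scans for and deletes the first adjacent case-insensitive pair until none remains; equality of results follows from confluence of the cancellation.
import Mathlib
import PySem

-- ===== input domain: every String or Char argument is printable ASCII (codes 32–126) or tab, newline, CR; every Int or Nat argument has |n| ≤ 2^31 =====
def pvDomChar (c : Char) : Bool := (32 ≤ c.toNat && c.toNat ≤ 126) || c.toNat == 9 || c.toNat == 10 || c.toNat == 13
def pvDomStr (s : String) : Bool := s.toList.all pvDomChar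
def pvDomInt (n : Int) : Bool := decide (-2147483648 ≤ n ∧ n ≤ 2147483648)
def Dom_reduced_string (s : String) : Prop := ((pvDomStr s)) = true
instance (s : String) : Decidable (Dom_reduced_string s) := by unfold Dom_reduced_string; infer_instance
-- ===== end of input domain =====

-- B replaces A's one-pass stack with an iterate-to-fixpoint repeated scan that deletes the
-- leftmost adjacent case-insensitive pair until none remains (alternative algorithm, not faster).

-- ===== PORT A =====
-- the body of A's for-loop: pop on a case-insensitive match with the top, else push
def pvStepA (stack : List Char) (char : Char) : List Char :=
  match stack with
  | top :: rest =>
      if PySem.Chars.lowerChar top = PySem.Chars.lowerChar char then rest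
      else char :: top :: rest
  | [] => [char]

def reduced_string (s : String) : String :=
  String.ofList (s.toList.foldl pvStepA []).reverse

-- ===== PORT B =====
-- Python's inner for-loop: scan for the leftmost adjacent case-insensitive pair, delete it
def pvDelFirst : List Char → Option (List Char)
  | a :: b :: t =>
      if PySem.Chars.lowerChar a = PySem.Chars.lowerChar b then some t
      else (pvDelFirst (b :: t)).map (a :: ·)
  | _ => none

theorem pvDelFirst_length : ∀ (l l' : List Char), pvDelFirst l = some l' → l'.length < l.length := by
  intro l
  induction l with
  | nil => intro l' h; simp [pvDelFirst] at h
  | cons a t ih =>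
    intro l' h
    match t with
    | [] => simp [pvDelFirst] at h
    | b :: u =>
      simp only [pvDelFirst] at h
      split at h
      · cases h; simp
      · simp only [Option.map_eq_some_iff] at h
        obtain ⟨m, hm, rfl⟩ := h
        have := ih m hm
        simp at this ⊢
        omega

-- Python's outer while-loop: repeat until a full scan deletes nothing
def pvFix (l : List Char) : List Char :=
  match h : pvDelFirst l with
  | some l' => pvFix l'
  | none => l
termination_by l.length
decreasing_by exact pvDelFirst_length _ _ h

def reduced_string_alt (s : String) : String := String.ofList (pvFix s.toList)

-- ===== PRECONDITION & SPEC =====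
def Spec_reduced_string (s : String) (out : String) : Prop := out = reduced_string_alt s
instance (s : String) (out : String) : Decidable (Spec_reduced_string s out) := by unfold Spec_reduced_string; infer_instance

-- ===== CLAIM (what is proved, stated in full; the proofs are below) =====
def Claim_equal_reduced_string : Prop := ∀ (s : String), Dom_reduced_string s → Spec_reduced_string s (reduced_string s)

-- ===== LEMMAS AND PROOFS =====

-- "no boundary match": the stack top (if any) does not case-insensitively match the next char (if any)
def pvNB (st l : List Char) : Prop :=
  ∀ h c, st.head? = some h → l.head? = some c →
    PySem.Chars.lowerChar h ≠ PySem.Chars.lowerChar c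

theorem pvNB_nil (l : List Char) : pvNB [] l := by
  intro h c hh _; simp at hh

theorem pvStepA_push (st : List Char) (c : Char) (r : List Char) (h : pvNB st (c :: r)) :
    pvStepA st c = c :: st := by
  match st with
  | [] => rfl
  | top :: rest =>
    have : PySem.Chars.lowerChar top ≠ PySem.Chars.lowerChar c := h top c rfl rfl
    simp [pvStepA, this]

-- deleting the leftmost matching pair does not change the fold, given no boundary match
theorem pvFoldl_delFirst : ∀ (l l' st : List Char), pvDelFirst l = some l' → pvNB st l →
    List.foldl pvStepA st l = List.foldl pvStepA st l' := by
  intro l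
  induction l with
  | nil => intro l' st h _; simp [pvDelFirst] at h
  | cons a t ih =>
    intro l' st h hnb
    match t with
    | [] => simp [pvDelFirst] at h
    | b :: u =>
      simp only [pvDelFirst] at h
      have hpush : pvStepA st a = a :: st := pvStepA_push st a (b :: u) hnb
      split at h
      · -- leftmost pair is (a, b): both sides drop it
        rename_i hab
        cases h
        simp only [List.foldl_cons, hpush]
        have : pvStepA (a :: st) b = st := by simp [pvStepA, hab]
        rw [this]
      · -- pair found further right, recurse
        rename_i hab
        simp only [Option.map_eq_some_iff] at h
        obtain ⟨m, hm, rfl⟩ := h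
        have hnb' : pvNB (a :: st) (b :: u) := by
          intro h c hh hc
          simp at hh hc
          rw [← hh, ← hc]
          exact fun he => hab he
        have hpushR : pvStepA st a = a :: st := pvStepA_push st a m (by
          intro h c hh hc
          simp at hc
          subst hc
          exact hnb h a hh rfl)
        simp only [List.foldl_cons, hpush, hpushR]
        exact ih m (a :: st) hm hnb'

-- when no pair matches anywhere, the stack pass just pushes everything
theorem pvFoldl_none : ∀ (l st : List Char), pvDelFirst l = none → pvNB st l →
    List.foldl pvStepA st l = l.reverse ++ st := by
  intro l
  induction l with
  | nil => intro st _ _; simp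
  | cons a t ih =>
    intro st h hnb
    have hpush : pvStepA st a = a :: st := pvStepA_push st a t hnb
    match t with
    | [] => simp [List.foldl_cons, hpush]
    | b :: u =>
      simp only [pvDelFirst] at h
      split at h
      · simp at h
      · rename_i hab
        simp only [Option.map_eq_none_iff] at h
        have hnb' : pvNB (a :: st) (b :: u) := by
          intro h c hh hc
          simp at hh hc
          rw [← hh, ← hc]
          exact fun he => hab he
        simp only [List.foldl_cons, hpush, ih (a :: st) h hnb']
        simp

theorem pvFix_some (l l' : List Char) (h : pvDelFirst l = some l') : pvFix l = pvFix l' := by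
  conv_lhs => rw [pvFix]
  split <;> simp_all

theorem pvFix_none (l : List Char) (h : pvDelFirst l = none) : pvFix l = l := by
  conv_lhs => rw [pvFix]
  split <;> simp_all

theorem pvRun_eq_fix (l : List Char) : (List.foldl pvStepA [] l).reverse = pvFix l := by
  induction l using pvFix.induct with
  | case1 l l' h ih =>
    rw [pvFix_some l l' h, ← ih, pvFoldl_delFirst l l' [] h (pvNB_nil l)]
  | case2 l h =>
    rw [pvFix_none l h, pvFoldl_none l [] h (pvNB_nil l)]
    simp

-- ===== VERDICT (by name: the statement is the Claim_ definition above) =====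
theorem reduced_string_spec : Claim_equal_reduced_string := by
  intro s _
  unfold Spec_reduced_string reduced_string reduced_string_alt
  rw [pvRun_eq_fix]
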